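-- pv_equiv track=rewrite | github.com/shubhamsingh-cell/media-plan-generator | data_orchestrator.py | _is_valid_salary_data
-- ===== SOURCE A (Python) =====
-- from typing import Any, Dict, List, Optional
--
-- def _is_valid_salary_data(data: Any) -> bool:
--     """Validate salary API response has meaningful content before caching."""
--     if not isinstance(data, dict):
--         return False
--     for key in (
--         "median",
--         "p50",
--         "annual_salary",
--         "salary",
--         "p25",
--         "p75",
--         "p10",
--         "p90",
--         "mean",
--     ):
--         val = data.get(key)
--         if isinstance(val, (int, float)) and val > 0:
--             return True
--     return False
-- ===== SOURCE B (Python) =====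
-- _VALID_SALARY_KEYS = frozenset({
--     "median", "p50", "annual_salary", "salary",
--     "p25", "p75", "p10", "p90", "mean",
-- })
--
--
-- def _is_valid_salary_data(data):
--     """Validate salary API response has meaningful content before caching."""
--     if not isinstance(data, dict):
--         return False
--     positive_keys = {
--         k for k, v in data.items() if isinstance(v, (int, float)) and v > 0
--     }
--     return not _VALID_SALARY_KEYS.isdisjoint(positive_keys)
-- ===== Notes on version B (the rewrite author's own statement) =====
-- stated objective: alternative
-- what changed: B builds the set of keys whose value is positive in one comprehension pass and answers with a single frozenset disjointness test against the nine valid names, instead of A's fixed-order loop probing each candidate key with dict.get and short-circuiting.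
import Mathlib
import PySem

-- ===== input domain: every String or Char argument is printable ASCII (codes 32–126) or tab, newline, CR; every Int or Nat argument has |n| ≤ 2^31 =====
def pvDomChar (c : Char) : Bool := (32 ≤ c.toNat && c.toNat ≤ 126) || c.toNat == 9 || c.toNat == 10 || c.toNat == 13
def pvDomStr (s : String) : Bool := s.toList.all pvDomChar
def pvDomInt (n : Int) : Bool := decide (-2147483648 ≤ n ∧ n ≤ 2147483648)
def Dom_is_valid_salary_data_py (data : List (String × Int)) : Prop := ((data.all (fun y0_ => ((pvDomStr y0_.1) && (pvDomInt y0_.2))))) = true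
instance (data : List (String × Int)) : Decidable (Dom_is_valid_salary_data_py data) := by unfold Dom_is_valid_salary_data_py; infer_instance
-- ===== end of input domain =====

-- B collects the set of positive-valued keys in one pass and decides by one frozenset
-- disjointness test, instead of A's fixed-order dict.get probe of nine candidate keys
-- ('alternative'; no speed claim).

-- ===== PORT A =====
-- the fixed key tuple A probes, in A's order
def pvSalaryKeys : List String :=
  ["median", "p50", "annual_salary", "salary", "p25", "p75", "p10", "p90", "mean"]

-- A's for-loop with early 'return True' = any over the key tuple; data is a dict (isinstance
-- guard is always true under the type convention; values are Int so isinstance(val,(int,float)) holds)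
def is_valid_salary_data_py (data : List (String × Int)) : Bool :=
  pvSalaryKeys.any (fun key =>
    match (PySem.Dict.mk data).get? key with
    | some val => decide (0 < val)
    | none => false)

-- ===== PORT B =====
-- the frozenset of valid key names
def pvValidSalaryKeySet : PySem.Set String := PySem.Set.ofList
  ["median", "p50", "annual_salary", "salary", "p25", "p75", "p10", "p90", "mean"]

-- B: set comprehension {k for k, v in data.items() if v > 0}, then not isdisjoint
def is_valid_salary_data_py_alt (data : List (String × Int)) : Bool :=
  let positiveKeys : PySem.Set String :=
    PySem.Set.ofList ((data.filter (fun kv => decide (0 < kv.2))).map Prod.fst)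
  !(PySem.Set.isdisjoint pvValidSalaryKeySet positiveKeys)

-- ===== PRECONDITION & SPEC =====
-- Pre_ excludes association lists with duplicate keys: those represent no Python dict (both
-- programs receive a dict, whose keys are unique), so the Lean-level behaviour there is not A's.
def Pre_is_valid_salary_data_py (data : List (String × Int)) : Prop :=
  (data.map Prod.fst).Nodup
instance (data : List (String × Int)) : Decidable (Pre_is_valid_salary_data_py data) := by
  unfold Pre_is_valid_salary_data_py; infer_instance

def pvWitness_is_valid_salary_data_py : (List (String × Int)) := [("median", 5), ("p25", -1)]

def Spec_is_valid_salary_data_py (data : List (String × Int)) (out : Bool) : Prop := out = is_valid_salary_data_py_alt data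
instance (data : List (String × Int)) (out : Bool) : Decidable (Spec_is_valid_salary_data_py data out) := by unfold Spec_is_valid_salary_data_py; infer_instance

-- ===== CLAIM (what is proved, stated in full; the proofs are below) =====
def Claim_equal_is_valid_salary_data_py : Prop := ∀ (data : List (String × Int)), Dom_is_valid_salary_data_py data → Pre_is_valid_salary_data_py data → Spec_is_valid_salary_data_py data (is_valid_salary_data_py data)

-- ===== LEMMAS AND PROOFS =====

-- Both sides decide the same existential: some entry (k, v) of data has k among the nine
-- valid keys and 0 < v.
theorem pv_A_iff (data : List (String × Int)) (h : (data.map Prod.fst).Nodup) :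
    is_valid_salary_data_py data = true ↔
      ∃ kv ∈ data, kv.1 ∈ pvSalaryKeys ∧ 0 < kv.2 := by
  have hkeys : (PySem.Dict.mk data).keys.Nodup := h
  simp only [is_valid_salary_data_py, List.any_eq_true]
  constructor
  · rintro ⟨key, hk, hf⟩
    cases hg : (PySem.Dict.mk data).get? key with
    | none => rw [hg] at hf; simp at hf
    | some v =>
      rw [hg] at hf
      have hmem : (key, v) ∈ data :=
        PySem.Dict.mem_items_of_get?_eq_some _ hg
      exact ⟨(key, v), hmem, hk, by simpa using hf⟩
  · rintro ⟨⟨k, v⟩, hmem, hk, hv⟩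
    refine ⟨k, hk, ?_⟩
    have hg : (PySem.Dict.mk data).get? k = some v :=
      PySem.Dict.get?_of_mem_items _ hmem hkeys
    rw [hg]; simpa using hv

theorem pv_B_iff (data : List (String × Int)) :
    is_valid_salary_data_py_alt data = true ↔
      ∃ kv ∈ data, kv.1 ∈ pvSalaryKeys ∧ 0 < kv.2 := by
  simp only [is_valid_salary_data_py_alt, Bool.not_eq_true', Bool.eq_false_iff, ne_eq,
    PySem.Set.isdisjoint_iff]
  push Not
  constructor
  · rintro ⟨k, hk, hkpos⟩
    rw [PySem.Set.mem_ofList] at hkpos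
    obtain ⟨kv, hkv, rfl⟩ := List.mem_map.1 hkpos
    obtain ⟨hmem, hpos⟩ := List.mem_filter.1 hkv
    refine ⟨kv, hmem, ?_, by simpa using hpos⟩
    simpa [pvValidSalaryKeySet, PySem.Set.mem_ofList, pvSalaryKeys] using hk
  · rintro ⟨kv, hmem, hk, hv⟩
    refine ⟨kv.1, ?_, ?_⟩
    · simpa [pvValidSalaryKeySet, PySem.Set.mem_ofList, pvSalaryKeys] using hk
    · rw [PySem.Set.mem_ofList]
      exact List.mem_map.2 ⟨kv, List.mem_filter.2 ⟨hmem, by simpa using hv⟩, rfl⟩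

-- ===== VERDICT (by name: the statement is the Claim_ definition above) =====
theorem is_valid_salary_data_py_spec : Claim_equal_is_valid_salary_data_py := by
  intro data _ hpre
  unfold Spec_is_valid_salary_data_py
  have := (pv_A_iff data hpre).trans (pv_B_iff data).symm
  cases hA : is_valid_salary_data_py data <;> cases hB : is_valid_salary_data_py_alt data <;>
    simp_all
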